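-- pv_equiv track=rewrite | github.com/iakonk/MyHomeRepos | python/examples/leetcode/amazon/zombie-in-matrix.py | min_hours
-- ===== SOURCE A (Python) =====
-- def min_hours(grid):
--     if not grid:
--         return
--
--     def neighbours(r, c):
--         for nr, nc in ((r + 1, c), (r, c + 1), (r - 1, c), (r, c - 1)):
--             if 0 <= nr < len(grid) and 0 <= nc < len(grid[0]):
--                 yield nr, nc
--
--     def turn_to_zombie():
--         """ turn neighbours and create a queue of new zombies """
--         new_q = []
--         for r, c in queue:
--             for nr, nc in neighbours(r, c):
--                 if not grid[nr][nc]: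
--                     grid[nr][nc] = 1
--                     new_q.append((nr, nc))
--         return new_q
--
--     time = 0
--     queue = [(i, j) for i, row in enumerate(grid) for j, val in enumerate(row) if val]
--     while True:
--         queue = turn_to_zombie()
--         if not queue:
--             break
--         time += 1
--
--     return time
-- ===== SOURCE B (Python) =====
-- def min_hours(grid):
--     if not grid:
--         return
--
--     def infectable(i, j):
--         for ni, nj in ((i - 1, j), (i + 1, j), (i, j - 1), (i, j + 1)):
--             if 0 <= ni < len(grid) and 0 <= nj < len(grid[ni]) and grid[ni][nj]:
--                 return True
--         return False
--
--     hours = 0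
--     while True:
--         targets = [(i, j) for i, row in enumerate(grid) for j, v in enumerate(row)
--                    if not v and infectable(i, j)]
--         if not targets:
--             return hours
--         for i, j in targets:
--             grid[i][j] = 1
--         hours += 1
-- ===== Notes on version B (the rewrite author's own statement) =====
-- stated objective: alternative
-- what changed: replaces the frontier-queue level-synchronized BFS with a queueless fixpoint sweep that rescans the whole grid each hour and infects every empty cell orthogonally adjacent to a zombie, counting sweeps until nothing changes (fewer Python-level per-neighbour generator calls per visited cell, though worst-case it rescans the grid once per hour)
-- outside the precondition, e.g. on min_hours([[1], [0, 0]]): A returns 1, B returns 2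
import Mathlib
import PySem

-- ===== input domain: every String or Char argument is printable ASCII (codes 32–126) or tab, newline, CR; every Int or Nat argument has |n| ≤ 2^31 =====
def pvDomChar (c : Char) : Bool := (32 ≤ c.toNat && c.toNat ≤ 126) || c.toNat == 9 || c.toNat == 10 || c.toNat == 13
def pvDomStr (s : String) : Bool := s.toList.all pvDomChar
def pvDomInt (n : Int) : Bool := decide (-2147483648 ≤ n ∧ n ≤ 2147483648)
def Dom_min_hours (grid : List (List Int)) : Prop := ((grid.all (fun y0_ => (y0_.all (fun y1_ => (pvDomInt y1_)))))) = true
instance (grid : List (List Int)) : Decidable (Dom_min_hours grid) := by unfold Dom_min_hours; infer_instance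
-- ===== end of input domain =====

-- B replaces A's frontier-queue level BFS by a queueless whole-grid fixpoint sweep (one rescan per hour);
-- both mutate the Python grid in place identically on Pre_; the equivalence proved is about the return value.


-- ===== PORT A =====
-- shared cell accessors (indices are Python ints; only used under 0 ≤ guards)
def pvGetCell (g : List (List Int)) (p : Int × Int) : Int :=
  (g.getD p.1.toNat []).getD p.2.toNat 0

def pvSetCell (g : List (List Int)) (p : Int × Int) : List (List Int) :=
  g.set p.1.toNat ((g.getD p.1.toNat []).set p.2.toNat 1)

-- `neighbours(r, c)`: bound for every row is len(grid[0])
def pvNbrs (R C : Int) (r c : Int) : List (Int × Int) :=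
  [(r+1,c),(r,c+1),(r-1,c),(r,c-1)].filter
    (fun p => decide (0 ≤ p.1 ∧ p.1 < R ∧ 0 ≤ p.2 ∧ p.2 < C))

-- `turn_to_zombie()`: mutate grid while collecting the new queue
def pvTurn (R C : Int) (g : List (List Int)) (q : List (Int × Int)) :
    List (List Int) × List (Int × Int) :=
  q.foldl (fun st p =>
    (pvNbrs R C p.1 p.2).foldl (fun st n =>
      if pvGetCell st.1 n = 0 then (pvSetCell st.1 n, st.2 ++ [n]) else st) st)
    (g, ([] : List (Int × Int)))

-- `while True: …` (fuel R*C+1 certainly exceeds the number of rounds on rectangular grids)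
def pvALoop (R C : Int) : Nat → List (List Int) → List (Int × Int) → Int → Int
  | 0, _, _, t => t
  | f+1, g, q, t =>
    let gq := pvTurn R C g q
    if gq.2 = [] then t else pvALoop R C f gq.1 gq.2 (t+1)

def pvInitQ (g : List (List Int)) : List (Int × Int) :=
  (PySem.List.enumerate g 0).flatMap (fun ir =>
    (PySem.List.enumerate ir.2 0).filterMap (fun jv =>
      if jv.2 ≠ 0 then some (ir.1, jv.1) else none))

def min_hours (grid : List (List Int)) : Option Int :=
  if grid = [] then none
  else
    some (pvALoop (grid.length : Int) ((grid.headD []).length : Int)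
      (grid.length * (grid.headD []).length + 1) grid (pvInitQ grid) 0)

-- ===== PORT B =====
-- `infectable(i, j)`: some orthogonal neighbour (per-row bounds) holds a zombie
def pvInfectable (g : List (List Int)) (i j : Int) : Bool :=
  [(i-1,j),(i+1,j),(i,j-1),(i,j+1)].any (fun p =>
    decide (0 ≤ p.1 ∧ p.1 < (g.length : Int) ∧ 0 ≤ p.2 ∧
      p.2 < ((g.getD p.1.toNat []).length : Int) ∧ pvGetCell g p ≠ 0))

-- the row-major sweep collecting this hour's targets
def pvTargets (g : List (List Int)) : List (Int × Int) :=
  (PySem.List.enumerate g 0).flatMap (fun ir =>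
    (PySem.List.enumerate ir.2 0).filterMap (fun jv =>
      if jv.2 = 0 ∧ pvInfectable g ir.1 jv.1 = true then some (ir.1, jv.1) else none))

def pvInfect (g : List (List Int)) (ts : List (Int × Int)) : List (List Int) :=
  ts.foldl (fun h p => pvSetCell h p) g

def pvBLoop : Nat → List (List Int) → Int → Int
  | 0, _, t => t
  | f+1, g, t =>
    let ts := pvTargets g
    if ts = [] then t else pvBLoop f (pvInfect g ts) (t+1)

def min_hours_alt (grid : List (List Int)) : Option Int :=
  if grid = [] then none
  else some (pvBLoop ((grid.map List.length).sum + 1) grid 0)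

-- ===== PRECONDITION & SPEC =====
-- Pre_ excludes non-rectangular grids that mix zombies with empty cells (or have a row shorter
-- than row 0): there A may raise IndexError, and where it still returns, its spread region is an
-- accident of using len(grid[0]) as the column bound for every row.
def Pre_min_hours (grid : List (List Int)) : Prop :=
  (∀ row ∈ grid, row.length = (grid.headD []).length) ∨
  ((∀ row ∈ grid, (grid.headD []).length ≤ row.length) ∧ ∀ row ∈ grid, ∀ v ∈ row, v ≠ 0) ∨
  (∀ row ∈ grid, ∀ v ∈ row, v = 0)

instance (grid : List (List Int)) : Decidable (Pre_min_hours grid) := by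
  unfold Pre_min_hours; infer_instance

def pvWitness_min_hours : List (List Int) := [[1, 0, 0], [0, 0, 2]]

def Spec_min_hours (grid : List (List Int)) (out : Option Int) : Prop := out = min_hours_alt grid
instance (grid : List (List Int)) (out : Option Int) : Decidable (Spec_min_hours grid out) := by
  unfold Spec_min_hours; infer_instance

-- ===== CLAIM (what is proved, stated in full; the proofs are below) =====
def Claim_equal_min_hours : Prop :=
  ∀ (grid : List (List Int)), Dom_min_hours grid → Pre_min_hours grid →
    Spec_min_hours grid (min_hours grid)

-- ===== LEMMAS AND PROOFS =====

-- spec-layer notions (Int coordinates)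
def pvShape (R C : Int) (g : List (List Int)) : Prop :=
  (g.length : Int) = R ∧ ∀ row ∈ g, (row.length : Int) = C

def pvInb (R C : Int) (x : Int × Int) : Prop :=
  0 ≤ x.1 ∧ x.1 < R ∧ 0 ≤ x.2 ∧ x.2 < C

def pvAdj (p x : Int × Int) : Prop :=
  x = (p.1+1,p.2) ∨ x = (p.1,p.2+1) ∨ x = (p.1-1,p.2) ∨ x = (p.1,p.2-1)

def pvInv (R C : Int) (g : List (List Int)) (q : List (Int × Int)) : Prop :=
  (∀ p ∈ q, pvInb R C p ∧ pvGetCell g p ≠ 0) ∧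
  (∀ x, pvInb R C x → pvGetCell g x = 0 →
    (∃ y, pvAdj x y ∧ pvInb R C y ∧ pvGetCell g y ≠ 0) → ∃ p ∈ q, pvAdj p x)

theorem pvAdj_symm {p x : Int × Int} (h : pvAdj p x) : pvAdj x p := by
  obtain ⟨a, b⟩ := p; obtain ⟨c, d⟩ := x
  simp only [pvAdj, Prod.mk.injEq] at h ⊢
  omega

theorem mem_pvNbrs {R C : Int} {r c : Int} {x : Int × Int} :
    x ∈ pvNbrs R C r c ↔ pvAdj (r, c) x ∧ pvInb R C x := by
  simp only [pvNbrs, List.mem_filter, List.mem_cons, List.not_mem_nil, or_false,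
    decide_eq_true_eq, pvAdj, pvInb]

theorem pvShape_set {R C : Int} {g : List (List Int)} (hs : pvShape R C g) (p : Int × Int)
    (hp : pvInb R C p) : pvShape R C (pvSetCell g p) := by
  obtain ⟨hR, hC⟩ := hs
  obtain ⟨h1, h2, h3, h4⟩ := hp
  have hi : p.1.toNat < g.length := by omega
  refine ⟨by simpa [pvSetCell] using hR, ?_⟩
  intro row hrow
  rcases List.mem_or_eq_of_mem_set hrow with h | h
  · exact hC row h
  · subst h
    rw [List.length_set, List.getD_eq_getElem _ _ hi]
    exact hC _ (List.getElem_mem hi)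

theorem pvGetCell_set {R C : Int} {g : List (List Int)} (hs : pvShape R C g)
    {p x : Int × Int} (hp : pvInb R C p) (hx : pvInb R C x) :
    pvGetCell (pvSetCell g p) x = if x = p then 1 else pvGetCell g x := by
  obtain ⟨hR, hC⟩ := hs
  obtain ⟨p1, p2, p3, p4⟩ := hp
  obtain ⟨x1, x2, x3, x4⟩ := hx
  have hi : p.1.toNat < g.length := by omega
  have hxi : x.1.toNat < g.length := by omega
  have hrowp : ((g.getD p.1.toNat []).length : Int) = C := by
    rw [List.getD_eq_getElem _ _ hi]
    exact hC _ (List.getElem_mem hi)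
  have hxp : x = p ↔ (p.1.toNat = x.1.toNat ∧ p.2.toNat = x.2.toNat) := by
    constructor
    · rintro rfl; exact ⟨rfl, rfl⟩
    · rintro ⟨h5, h6⟩; exact Prod.ext (by omega) (by omega)
  by_cases hrow_eq : p.1.toNat = x.1.toNat
  · have hsetrow : (pvSetCell g p).getD x.1.toNat [] = (g.getD p.1.toNat []).set p.2.toNat 1 := by
      rw [pvSetCell, ← hrow_eq, List.getD_eq_getElem?_getD, List.getElem?_set_self hi]
      rfl
    rw [pvGetCell, hsetrow, List.getD_eq_getElem?_getD, List.getElem?_set]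
    by_cases hcol : p.2.toNat = x.2.toNat
    · rw [if_pos hcol, if_pos (by omega), if_pos (hxp.2 ⟨hrow_eq, hcol⟩)]
      rfl
    · rw [if_neg hcol, if_neg (by rw [hxp]; tauto)]
      simp [pvGetCell, ← hrow_eq, List.getD_eq_getElem?_getD]
  · rw [if_neg (by rw [hxp]; tauto)]
    simp only [pvGetCell, pvSetCell, List.getD_eq_getElem?_getD,
      List.getElem?_set_ne hrow_eq]

-- grids with equal shape and equal in-bounds cells are equal
theorem pvGetCell_nat {g : List (List Int)} {k m : Nat} (hk : k < g.length) :
    pvGetCell g ((k : Int), (m : Int)) = (g[k]).getD m 0 := by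
  simp [pvGetCell, List.getD_eq_getElem?_getD, List.getElem?_eq_getElem hk]

theorem pvGrid_ext {R C : Int} {g h : List (List Int)} (hg : pvShape R C g) (hh : pvShape R C h)
    (he : ∀ x, pvInb R C x → pvGetCell g x = pvGetCell h x) : g = h := by
  obtain ⟨hgR, hgC⟩ := hg
  obtain ⟨hhR, hhC⟩ := hh
  apply List.ext_getElem (by omega)
  intro i h1 h2
  have hrg : ((g[i]).length : Int) = C := hgC _ (List.getElem_mem h1)
  have hrh : ((h[i]).length : Int) = C := hhC _ (List.getElem_mem h2)
  apply List.ext_getElem (by omega)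
  intro j hj1 hj2
  have hx : pvInb R C ((i : Int), (j : Int)) := by
    refine ⟨by omega, by omega, by omega, by omega⟩
  have := he _ hx
  rw [pvGetCell_nat h1, pvGetCell_nat h2] at this
  rwa [List.getD_eq_getElem _ _ hj1, List.getD_eq_getElem _ _ hj2] at this

-- the inner fold of pvTurn (over one cell's neighbour list), named for the lemmas below
def pvStep1 (st : List (List Int) × List (Int × Int)) (n : Int × Int) :
    List (List Int) × List (Int × Int) :=
  if pvGetCell st.1 n = 0 then (pvSetCell st.1 n, st.2 ++ [n]) else st

theorem pvTurn_eq (R C : Int) (g : List (List Int)) (q : List (Int × Int)) :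
    pvTurn R C g q =
      q.foldl (fun st p => (pvNbrs R C p.1 p.2).foldl pvStep1 st) (g, []) := rfl

-- invariant carried through the folds of pvTurn, relative to the round's initial grid g0
def pvMask (R C : Int) (g0 g : List (List Int)) (acc : List (Int × Int)) : Prop :=
  pvShape R C g ∧
  (∀ x, pvInb R C x → (x ∈ acc → pvGetCell g x = 1) ∧ (x ∉ acc → pvGetCell g x = pvGetCell g0 x)) ∧
  (∀ x ∈ acc, pvInb R C x ∧ pvGetCell g0 x = 0)

theorem pvInner_char {R C : Int} {g0 : List (List Int)} :
    ∀ (ns : List (Int × Int)), (∀ n ∈ ns, pvInb R C n) →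
    ∀ (g : List (List Int)) (acc : List (Int × Int)), pvMask R C g0 g acc →
    pvMask R C g0 (ns.foldl pvStep1 (g, acc)).1 (ns.foldl pvStep1 (g, acc)).2 ∧
    (∀ x, x ∈ (ns.foldl pvStep1 (g, acc)).2 ↔
      x ∈ acc ∨ (pvInb R C x ∧ pvGetCell g0 x = 0 ∧ x ∈ ns)) := by
  intro ns
  induction ns with
  | nil => intro _ g acc hm; exact ⟨hm, by simp⟩
  | cons n ns ih =>
    intro hns g acc hm
    obtain ⟨hsh, H1, H2⟩ := hm
    have hn : pvInb R C n := hns n (List.mem_cons_self ..)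
    simp only [List.foldl_cons]
    by_cases hz : pvGetCell g n = 0
    · have hnacc : n ∉ acc := fun h => by have := (H1 n hn).1 h; omega
      have hg0n : pvGetCell g0 n = 0 := by rw [← (H1 n hn).2 hnacc]; exact hz
      have hstep : pvStep1 (g, acc) n = (pvSetCell g n, acc ++ [n]) := by
        simp [pvStep1, hz]
      rw [hstep]
      have hmask : pvMask R C g0 (pvSetCell g n) (acc ++ [n]) := by
        refine ⟨pvShape_set hsh n hn, ?_, ?_⟩
        · intro x hx
          rw [pvGetCell_set hsh hn hx]
          constructor
          · intro hmem
            rcases List.mem_append.1 hmem with h | h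
            · have hxn : ¬ x = n := fun he => by subst he; exact hnacc h
              rw [if_neg hxn]; exact (H1 x hx).1 h
            · simp only [List.mem_singleton] at h
              rw [if_pos h]
          · intro hmem
            have hxa : x ∉ acc := fun h => hmem (List.mem_append.2 (Or.inl h))
            have hxn : ¬ x = n := fun he => hmem (List.mem_append.2 (Or.inr (by simp [he])))
            rw [if_neg hxn]; exact (H1 x hx).2 hxa
        · intro x hx
          rcases List.mem_append.1 hx with h | h
          · exact H2 x h
          · simp only [List.mem_singleton] at h; subst h; exact ⟨hn, hg0n⟩
      obtain ⟨hm', hmem'⟩ := ih (fun m hm => hns m (List.mem_cons_of_mem _ hm)) _ _ hmask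
      refine ⟨hm', ?_⟩
      intro x
      rw [hmem' x]
      simp only [List.mem_append, List.mem_cons, List.not_mem_nil, or_false]
      constructor
      · rintro ((h | h) | h)
        · exact Or.inl h
        · subst h; exact Or.inr ⟨hn, hg0n, Or.inl rfl⟩
        · exact Or.inr ⟨h.1, h.2.1, Or.inr h.2.2⟩
      · rintro (h | ⟨hi, h0, (h | h)⟩)
        · exact Or.inl (Or.inl h)
        · exact Or.inl (Or.inr h)
        · exact Or.inr ⟨hi, h0, h⟩
    · have hstep : pvStep1 (g, acc) n = (g, acc) := by simp [pvStep1, hz]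
      rw [hstep]
      obtain ⟨hm', hmem'⟩ := ih (fun m hm => hns m (List.mem_cons_of_mem _ hm)) _ _ ⟨hsh, H1, H2⟩
      refine ⟨hm', ?_⟩
      intro x
      rw [hmem' x]
      simp only [List.mem_cons]
      constructor
      · rintro (h | h)
        · exact Or.inl h
        · exact Or.inr ⟨h.1, h.2.1, Or.inr h.2.2⟩
      · rintro (h | ⟨hi, h0, (h | h)⟩)
        · exact Or.inl h
        · -- x = n, g0 x = 0: then g x ≠ 0 forces x ∈ acc
          subst h
          by_cases hacc : x ∈ acc
          · exact Or.inl hacc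
          · exact absurd ((H1 x hi).2 hacc ▸ hz) (by rw [h0]; simp)
        · exact Or.inr ⟨hi, h0, h⟩

theorem pvTurn_char {R C : Int} {g0 : List (List Int)} (hs : pvShape R C g0)
    (q : List (Int × Int)) :
    pvMask R C g0 (pvTurn R C g0 q).1 (pvTurn R C g0 q).2 ∧
    (∀ x, x ∈ (pvTurn R C g0 q).2 ↔
      pvInb R C x ∧ pvGetCell g0 x = 0 ∧ ∃ p ∈ q, pvAdj p x) := by
  rw [pvTurn_eq]
  suffices h : ∀ (q : List (Int × Int)) (g : List (List Int)) (acc : List (Int × Int)),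
      pvMask R C g0 g acc →
      pvMask R C g0 (q.foldl (fun st p => (pvNbrs R C p.1 p.2).foldl pvStep1 st) (g, acc)).1
        (q.foldl (fun st p => (pvNbrs R C p.1 p.2).foldl pvStep1 st) (g, acc)).2 ∧
      (∀ x, x ∈ (q.foldl (fun st p => (pvNbrs R C p.1 p.2).foldl pvStep1 st) (g, acc)).2 ↔
        x ∈ acc ∨ (pvInb R C x ∧ pvGetCell g0 x = 0 ∧ ∃ p ∈ q, pvAdj p x)) by
    obtain ⟨h1, h2⟩ := h q g0 [] ⟨hs, by intro x hx; simp, by simp⟩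
    refine ⟨h1, ?_⟩
    intro x
    rw [h2 x]
    simp
  intro q
  induction q with
  | nil => intro g acc hm; exact ⟨hm, by simp⟩
  | cons p q ih =>
    intro g acc hm
    simp only [List.foldl_cons]
    have hns : ∀ n ∈ pvNbrs R C p.1 p.2, pvInb R C n := fun n hn => (mem_pvNbrs.1 hn).2
    obtain ⟨hm1, hmem1⟩ := pvInner_char _ hns g acc hm
    obtain ⟨hm2, hmem2⟩ := ih _ _ hm1
    refine ⟨hm2, ?_⟩
    intro x
    rw [hmem2 x, hmem1 x]
    constructor
    · rintro ((h | ⟨hi, h0, hn⟩) | ⟨hi, h0, p', hp', ha⟩)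
      · exact Or.inl h
      · exact Or.inr ⟨hi, h0, p, List.mem_cons_self .., (mem_pvNbrs.1 hn).1⟩
      · exact Or.inr ⟨hi, h0, p', List.mem_cons_of_mem _ hp', ha⟩
    · rintro (h | ⟨hi, h0, p', hp', ha⟩)
      · exact Or.inl (Or.inl h)
      · rcases List.mem_cons.1 hp' with h | h
        · subst h
          exact Or.inl (Or.inr ⟨hi, h0, mem_pvNbrs.2 ⟨ha, hi⟩⟩)
        · exact Or.inr ⟨hi, h0, p', h, ha⟩

-- B-side characterisations
theorem pvInfectable_iff {R C : Int} {g : List (List Int)} (hs : pvShape R C g) (i j : Int) :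
    pvInfectable g i j = true ↔
      ∃ y, pvAdj (i, j) y ∧ pvInb R C y ∧ pvGetCell g y ≠ 0 := by
  obtain ⟨hR, hC⟩ := hs
  have hrow : ∀ y : Int × Int, 0 ≤ y.1 → y.1 < (g.length : Int) →
      ((g.getD y.1.toNat []).length : Int) = C := by
    intro y h1 h2
    have hy : y.1.toNat < g.length := by omega
    rw [List.getD_eq_getElem _ _ hy]
    exact hC _ (List.getElem_mem hy)
  rw [pvInfectable, List.any_eq_true]
  constructor
  · rintro ⟨y, hy, hcond⟩
    simp only [decide_eq_true_eq] at hcond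
    obtain ⟨h1, h2, h3, h4, h5⟩ := hcond
    have hCy : ((g.getD y.1.toNat []).length : Int) = C := hrow y h1 (by omega)
    refine ⟨y, ?_, ⟨h1, by omega, h3, by omega⟩, h5⟩
    simp only [List.mem_cons, List.not_mem_nil, or_false] at hy
    simp only [pvAdj, Prod.ext_iff] at hy ⊢
    obtain ⟨a, b⟩ := y
    simp only at hy ⊢
    omega
  · rintro ⟨y, ha, ⟨h1, h2, h3, h4⟩, h5⟩
    refine ⟨y, ?_, ?_⟩
    · simp only [pvAdj, Prod.ext_iff] at ha
      simp only [List.mem_cons, List.not_mem_nil, or_false, Prod.ext_iff]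
      obtain ⟨a, b⟩ := y
      simp only at ha ⊢
      omega
    · have hCy : ((g.getD y.1.toNat []).length : Int) = C := hrow y h1 (by omega)
      simp only [decide_eq_true_eq]
      exact ⟨h1, by omega, h3, by omega, h5⟩

theorem pvInb_decomp {R C : Int} {x : Int × Int} (hx : pvInb R C x) :
    ∃ (k m : Nat), x = ((k : Int), (m : Int)) ∧ (k : Int) < R ∧ (m : Int) < C := by
  obtain ⟨h1, h2, h3, h4⟩ := hx
  exact ⟨x.1.toNat, x.2.toNat, by ext <;> simp <;> omega, by omega, by omega⟩

theorem mem_pvTargets {R C : Int} {g : List (List Int)} (hs : pvShape R C g) (x : Int × Int) :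
    x ∈ pvTargets g ↔
      pvInb R C x ∧ pvGetCell g x = 0 ∧
        ∃ y, pvAdj x y ∧ pvInb R C y ∧ pvGetCell g y ≠ 0 := by
  obtain ⟨hR, hC⟩ := hs
  rw [pvTargets]
  simp only [List.mem_flatMap, List.mem_filterMap, PySem.List.mem_enumerate_iff]
  constructor
  · rintro ⟨ir, ⟨k, hk, rfl⟩, jv, ⟨m, hm, rfl⟩, hif⟩
    dsimp only at hm hif
    simp only [zero_add] at hif
    have hrow : ((g[k]).length : Int) = C := hC _ (List.getElem_mem hk)
    split_ifs at hif with hcond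
    · obtain ⟨h0, hinf⟩ := hcond
      simp only [Option.some.injEq] at hif
      subst hif
      have hxin : pvInb R C ((k : Int), (m : Int)) :=
        ⟨by omega, by omega, by omega, by omega⟩
      refine ⟨hxin, ?_, (pvInfectable_iff ⟨hR, hC⟩ _ _).1 hinf⟩
      rw [pvGetCell_nat hk, List.getD_eq_getElem _ _ hm]
      exact h0
  · rintro ⟨hxin, h0, hex⟩
    obtain ⟨k, m, rfl, hkR, hmC⟩ := pvInb_decomp hxin
    have hk : k < g.length := by omega
    have hrow : ((g[k]).length : Int) = C := hC _ (List.getElem_mem hk)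
    have hm : m < (g[k]).length := by omega
    refine ⟨((0 : Int) + (k : Int), g[k]), ⟨k, hk, rfl⟩,
      ((0 : Int) + (m : Int), (g[k])[m]), ⟨m, hm, rfl⟩, ?_⟩
    dsimp only
    simp only [zero_add]
    rw [pvGetCell_nat hk, List.getD_eq_getElem _ _ hm] at h0
    rw [if_pos ⟨h0, (pvInfectable_iff ⟨hR, hC⟩ _ _).2 hex⟩]

theorem pvInfect_char {R C : Int} :
    ∀ (ts : List (Int × Int)), (∀ p ∈ ts, pvInb R C p) →
    ∀ (g : List (List Int)), pvShape R C g →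
    pvShape R C (pvInfect g ts) ∧
    (∀ x, pvInb R C x →
      (x ∈ ts → pvGetCell (pvInfect g ts) x = 1) ∧
      (x ∉ ts → pvGetCell (pvInfect g ts) x = pvGetCell g x)) := by
  intro ts
  induction ts with
  | nil => intro _ g hs; exact ⟨hs, fun x hx => ⟨by simp, fun _ => rfl⟩⟩
  | cons p ts ih =>
    intro hts g hs
    have hp : pvInb R C p := hts p (List.mem_cons_self ..)
    have hstep : pvInfect g (p :: ts) = pvInfect (pvSetCell g p) ts := rfl
    obtain ⟨hs', H⟩ := ih (fun m hm => hts m (List.mem_cons_of_mem _ hm)) _ (pvShape_set hs p hp)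
    rw [hstep]
    refine ⟨hs', fun x hx => ⟨?_, ?_⟩⟩
    · intro hmem
      rcases List.mem_cons.1 hmem with h | h
      · by_cases hts' : x ∈ ts
        · exact (H x hx).1 hts'
        · rw [(H x hx).2 hts', pvGetCell_set hs hp hx, if_pos h]
      · exact (H x hx).1 h
    · intro hmem
      have hxp : ¬ x = p := fun h => hmem (List.mem_cons.2 (Or.inl h))
      have hxts : x ∉ ts := fun h => hmem (List.mem_cons.2 (Or.inr h))
      rw [(H x hx).2 hxts, pvGetCell_set hs hp hx, if_neg hxp]

theorem mem_pvInitQ {R C : Int} {g : List (List Int)} (hs : pvShape R C g) (x : Int × Int) :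
    x ∈ pvInitQ g ↔ pvInb R C x ∧ pvGetCell g x ≠ 0 := by
  obtain ⟨hR, hC⟩ := hs
  rw [pvInitQ]
  simp only [List.mem_flatMap, List.mem_filterMap, PySem.List.mem_enumerate_iff]
  constructor
  · rintro ⟨ir, ⟨k, hk, rfl⟩, jv, ⟨m, hm, rfl⟩, hif⟩
    dsimp only at hm hif
    simp only [zero_add] at hif
    have hrow : ((g[k]).length : Int) = C := hC _ (List.getElem_mem hk)
    split_ifs at hif with hcond
    · simp only [Option.some.injEq] at hif
      subst hif
      refine ⟨⟨by omega, by omega, by omega, by omega⟩, ?_⟩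
      rw [pvGetCell_nat hk, List.getD_eq_getElem _ _ hm]
      exact hcond
  · rintro ⟨hxin, h0⟩
    obtain ⟨k, m, rfl, hkR, hmC⟩ := pvInb_decomp hxin
    have hk : k < g.length := by omega
    have hrow : ((g[k]).length : Int) = C := hC _ (List.getElem_mem hk)
    have hm : m < (g[k]).length := by omega
    rw [pvGetCell_nat hk, List.getD_eq_getElem _ _ hm] at h0
    refine ⟨((0 : Int) + (k : Int), g[k]), ⟨k, hk, rfl⟩,
      ((0 : Int) + (m : Int), (g[k])[m]), ⟨m, hm, rfl⟩, ?_⟩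
    dsimp only
    simp only [zero_add]
    rw [if_pos h0]

-- one round of A equals one round of B, and the invariant is preserved
theorem pvRound {R C : Int} {g : List (List Int)} {q : List (Int × Int)}
    (hs : pvShape R C g) (hinv : pvInv R C g q) :
    (pvTurn R C g q).1 = pvInfect g (pvTargets g) ∧
    ((pvTurn R C g q).2 = [] ↔ pvTargets g = []) ∧
    pvShape R C (pvTurn R C g q).1 ∧
    pvInv R C (pvTurn R C g q).1 (pvTurn R C g q).2 := by
  obtain ⟨hq1, hq2⟩ := hinv
  obtain ⟨⟨hsh', H1', H2'⟩, hmem⟩ := pvTurn_char hs q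
  -- the A-round infected set equals the B-round target set
  have hsets : ∀ x, x ∈ (pvTurn R C g q).2 ↔ x ∈ pvTargets g := by
    intro x
    rw [hmem x, mem_pvTargets hs x]
    constructor
    · rintro ⟨hi, h0, p, hp, ha⟩
      obtain ⟨hpin, hpnz⟩ := hq1 p hp
      exact ⟨hi, h0, p, pvAdj_symm ha, hpin, hpnz⟩
    · rintro ⟨hi, h0, y, ha, hyin, hynz⟩
      exact ⟨hi, h0, hq2 x hi h0 ⟨y, ha, hyin, hynz⟩⟩
  have htsin : ∀ p ∈ pvTargets g, pvInb R C p := by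
    intro p hp
    exact ((mem_pvTargets hs p).1 hp).1
  obtain ⟨hsI, HI⟩ := pvInfect_char (pvTargets g) htsin g hs
  have hgrid : (pvTurn R C g q).1 = pvInfect g (pvTargets g) := by
    apply pvGrid_ext hsh' hsI
    intro x hx
    by_cases hmem' : x ∈ (pvTurn R C g q).2
    · rw [(H1' x hx).1 hmem', (HI x hx).1 ((hsets x).1 hmem')]
    · rw [(H1' x hx).2 hmem', (HI x hx).2 (fun h => hmem' ((hsets x).2 h))]
  refine ⟨hgrid, ?_, hsh', ?_, ?_⟩
  · constructor
    · intro h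
      rw [List.eq_nil_iff_forall_not_mem]
      intro x hx
      exact (List.eq_nil_iff_forall_not_mem.1 h x) ((hsets x).2 hx)
    · intro h
      rw [List.eq_nil_iff_forall_not_mem]
      intro x hx
      exact (List.eq_nil_iff_forall_not_mem.1 h x) ((hsets x).1 hx)
  · -- invariant part 1 for the new state
    intro p hp
    have hpin := (hmem p).1 hp
    exact ⟨hpin.1, by rw [(H1' p hpin.1).1 hp]; omega⟩
  · -- invariant part 2 for the new state
    intro x hx h0 ⟨y, ha, hyin, hynz⟩
    have hxq' : x ∉ (pvTurn R C g q).2 := fun h => by rw [(H1' x hx).1 h] at h0; omega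
    have hx0 : pvGetCell g x = 0 := by rw [← (H1' x hx).2 hxq']; exact h0
    by_cases hyq' : y ∈ (pvTurn R C g q).2
    · exact ⟨y, hyq', pvAdj_symm ha⟩
    · have hy0 : pvGetCell g y ≠ 0 := by rw [← (H1' y hyin).2 hyq']; exact hynz
      have : x ∈ (pvTurn R C g q).2 :=
        (hmem x).2 ⟨hx, hx0, hq2 x hx hx0 ⟨y, ha, hyin, hy0⟩⟩
      exact absurd this hxq'

theorem pvLoop_eq {R C : Int} :
    ∀ (f : Nat) (g : List (List Int)) (q : List (Int × Int)) (t : Int),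
      pvShape R C g → pvInv R C g q → pvALoop R C f g q t = pvBLoop f g t := by
  intro f
  induction f with
  | zero => intro g q t _ _; rfl
  | succ f ih =>
    intro g q t hs hinv
    obtain ⟨hgrid, hempt, hsh', hinv'⟩ := pvRound hs hinv
    rw [pvALoop, pvBLoop]
    by_cases hq : (pvTurn R C g q).2 = []
    · rw [if_pos hq, if_pos (hempt.1 hq)]
    · rw [if_neg hq, if_neg (fun h => hq (hempt.2 h))]
      rw [← hgrid]
      exact ih _ _ _ hsh' (hgrid ▸ hinv')

-- degenerate rounds: a grid with no in-rectangle empty cell makes A's first round a no-op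
theorem pvTurn_id {R C : Int} {g : List (List Int)}
    (hnz : ∀ n, pvInb R C n → pvGetCell g n ≠ 0) (q : List (Int × Int)) :
    pvTurn R C g q = (g, []) := by
  rw [pvTurn_eq]
  have hinner : ∀ (ns : List (Int × Int)), (∀ n ∈ ns, pvInb R C n) →
      ∀ acc : List (Int × Int), ns.foldl pvStep1 (g, acc) = (g, acc) := by
    intro ns
    induction ns with
    | nil => intro _ acc; rfl
    | cons n ns ih =>
      intro h acc
      simp only [List.foldl_cons]
      rw [show pvStep1 (g, acc) n = (g, acc) by
        simp [pvStep1, hnz n (h n (List.mem_cons_self ..))]]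
      exact ih (fun m hm => h m (List.mem_cons_of_mem _ hm)) acc
  induction q with
  | nil => rfl
  | cons p q ih =>
    simp only [List.foldl_cons]
    rw [hinner _ (fun n hn => (mem_pvNbrs.1 hn).2) []]
    exact ih

theorem pvTargets_nil_of_nonzero {g : List (List Int)}
    (h : ∀ row ∈ g, ∀ v ∈ row, v ≠ 0) : pvTargets g = [] := by
  rw [List.eq_nil_iff_forall_not_mem]
  intro x hx
  rw [pvTargets] at hx
  simp only [List.mem_flatMap, List.mem_filterMap, PySem.List.mem_enumerate_iff] at hx
  obtain ⟨ir, ⟨k, hk, rfl⟩, jv, ⟨m, hm, rfl⟩, hif⟩ := hx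
  dsimp only at hm hif
  split_ifs at hif with hc
  exact h _ (List.getElem_mem hk) _ (List.getElem_mem hm) hc.1

theorem pvGetCell_of_all_zero {g : List (List Int)}
    (h : ∀ row ∈ g, ∀ v ∈ row, v = 0) (p : Int × Int) : pvGetCell g p = 0 := by
  rw [pvGetCell]
  rcases Nat.lt_or_ge p.1.toNat g.length with ha | ha
  · rw [List.getD_eq_getElem _ _ ha]
    rcases Nat.lt_or_ge p.2.toNat (g[p.1.toNat]).length with hb | hb
    · rw [List.getD_eq_getElem _ _ hb]
      exact h _ (List.getElem_mem ha) _ (List.getElem_mem hb)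
    · exact List.getD_eq_default _ _ hb
  · rw [List.getD_eq_default _ _ ha]
    simp

theorem pvTargets_nil_of_all_zero {g : List (List Int)}
    (h : ∀ row ∈ g, ∀ v ∈ row, v = 0) : pvTargets g = [] := by
  rw [List.eq_nil_iff_forall_not_mem]
  intro x hx
  rw [pvTargets] at hx
  simp only [List.mem_flatMap, List.mem_filterMap, PySem.List.mem_enumerate_iff] at hx
  obtain ⟨ir, ⟨k, hk, rfl⟩, jv, ⟨m, hm, rfl⟩, hif⟩ := hx
  dsimp only at hm hif
  split_ifs at hif with hc
  have hinf : pvInfectable g ((0 : Int) + (k : Int)) ((0 : Int) + (m : Int)) = false := by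
    rw [pvInfectable, List.any_eq_false]
    intro p _
    simp [pvGetCell_of_all_zero h p]
  rw [hinf] at hc
  exact absurd hc.2 (by simp)

theorem pvInitQ_nil_of_all_zero {g : List (List Int)}
    (h : ∀ row ∈ g, ∀ v ∈ row, v = 0) : pvInitQ g = [] := by
  rw [List.eq_nil_iff_forall_not_mem]
  intro x hx
  rw [pvInitQ] at hx
  simp only [List.mem_flatMap, List.mem_filterMap, PySem.List.mem_enumerate_iff] at hx
  obtain ⟨ir, ⟨k, hk, rfl⟩, jv, ⟨m, hm, rfl⟩, hif⟩ := hx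
  dsimp only at hm hif
  split_ifs at hif with hc
  exact hc (h _ (List.getElem_mem hk) _ (List.getElem_mem hm))

-- ===== VERDICT (by name: the statement is the Claim_ definition above) =====
theorem min_hours_spec : Claim_equal_min_hours := by
  intro grid _ hpre
  unfold Spec_min_hours min_hours min_hours_alt
  by_cases hnil : grid = []
  · rw [if_pos hnil, if_pos hnil]
  · rw [if_neg hnil, if_neg hnil]
    rcases hpre with hrect | ⟨hge, hnz⟩ | hzero
    · -- rectangular grid: run the synchronized loop argument
      have hs : pvShape (grid.length : Int) ((grid.headD []).length : Int) grid :=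
        ⟨rfl, fun row hrow => by rw [hrect row hrow]⟩
      have hinv : pvInv (grid.length : Int) ((grid.headD []).length : Int) grid (pvInitQ grid) := by
        constructor
        · intro p hp
          exact (mem_pvInitQ hs p).1 hp
        · intro x hx h0 ⟨y, ha, hyin, hynz⟩
          exact ⟨y, (mem_pvInitQ hs y).2 ⟨hyin, hynz⟩, pvAdj_symm ha⟩
      have hfuel : (grid.map List.length).sum = grid.length * (grid.headD []).length := by
        rw [List.sum_eq_card_nsmul (grid.map List.length) ((grid.headD []).length)
          (by intro x hx; obtain ⟨row, hrow, rfl⟩ := List.mem_map.1 hx; exact hrect row hrow)]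
        simp [smul_eq_mul]
      rw [hfuel, pvLoop_eq _ _ _ _ hs hinv]
    · -- no empty cell inside the rectangle: both loops stop in the first round with 0
      have hnz' : ∀ n, pvInb (grid.length : Int) ((grid.headD []).length : Int) n →
          pvGetCell grid n ≠ 0 := by
        intro n hn
        obtain ⟨h1, h2, h3, h4⟩ := hn
        have ha : n.1.toNat < grid.length := by omega
        have hrow := hge _ (List.getElem_mem ha)
        have hb : n.2.toNat < (grid[n.1.toNat]).length := by omega
        rw [pvGetCell, List.getD_eq_getElem _ _ ha, List.getD_eq_getElem _ _ hb]
        exact hnz _ (List.getElem_mem ha) _ (List.getElem_mem hb)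
      rw [pvALoop, pvBLoop, pvTurn_id hnz', pvTargets_nil_of_nonzero hnz]
      simp
    · -- all-zero grid: no zombies at all, both return 0
      rw [pvALoop, pvBLoop, pvInitQ_nil_of_all_zero hzero, pvTargets_nil_of_all_zero hzero]
      simp [pvTurn]
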